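-- pv_equiv track=rewrite | github.com/safnuk/pdf2latex | latex.py | is_banned_env
-- ===== SOURCE A (Python) =====
-- BANNED_ENVIRONMENTS = [
--     'figure', 'tikzpicture', 'keywords', 'AMS', 'table', 'tikzcd',
--     'figure*',
-- ]
--
-- def is_banned_env(line, cmd):
--     if not line.startswith(cmd):
--         return False
--     for key in BANNED_ENVIRONMENTS:
--         text = cmd + '{%s}' % key
--         if line.startswith(text):
--             return True
--     return False
-- ===== SOURCE B (Python) =====
-- BANNED_ENVIRONMENTS = frozenset([
--     'figure', 'tikzpicture', 'keywords', 'AMS', 'table', 'tikzcd',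
--     'figure*',
-- ])
--
-- def is_banned_env(line, cmd):
--     if not line.startswith(cmd):
--         return False
--     rest = line[len(cmd):]
--     if not rest.startswith('{'):
--         return False
--     end = rest.find('}')
--     if end == -1:
--         return False
--     return rest[1:end] in BANNED_ENVIRONMENTS
-- ===== Notes on version B (the rewrite author's own statement) =====
-- stated objective: idiomatic
-- what changed: Replaces the loop of 7 prefix checks (each rebuilding cmd+'{key}') by a single parse: slice off cmd, require '{', find the first '}', and test the enclosed name against a frozenset.
import Mathlib
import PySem

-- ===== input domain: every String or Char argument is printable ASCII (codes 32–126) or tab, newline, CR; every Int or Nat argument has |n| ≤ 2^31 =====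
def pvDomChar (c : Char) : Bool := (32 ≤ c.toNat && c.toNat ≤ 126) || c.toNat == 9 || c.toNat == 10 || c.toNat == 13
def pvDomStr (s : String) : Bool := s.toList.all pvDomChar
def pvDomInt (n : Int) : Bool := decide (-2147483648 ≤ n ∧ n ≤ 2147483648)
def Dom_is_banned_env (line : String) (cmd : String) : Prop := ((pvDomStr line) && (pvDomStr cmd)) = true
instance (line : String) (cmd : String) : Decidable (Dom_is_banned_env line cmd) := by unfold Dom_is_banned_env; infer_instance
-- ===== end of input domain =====

-- B replaces A's loop of seven prefix checks by a single parse (slice off cmd, find the first '}', one set-membership test); objective: idiomatic.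

-- ===== PORT A =====
def pvBanned : List String :=
  ["figure", "tikzpicture", "keywords", "AMS", "table", "tikzcd", "figure*"]

def is_banned_env_loop (line : String) (cmd : String) : List String → Bool
  | [] => false
  | key :: rest =>
    if PySem.Str.startswith line (cmd ++ "{" ++ key ++ "}") then true
    else is_banned_env_loop line cmd rest

def is_banned_env (line : String) (cmd : String) : Bool :=
  if !(PySem.Str.startswith line cmd) then false
  else is_banned_env_loop line cmd pvBanned

-- ===== PORT B =====
def pvBannedSet : PySem.Set String :=
  PySem.Set.ofList ["figure", "tikzpicture", "keywords", "AMS", "table", "tikzcd", "figure*"]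

def is_banned_env_alt (line : String) (cmd : String) : Bool :=
  if !(PySem.Str.startswith line cmd) then false
  else
    let rest := PySem.Str.slice line (some (PySem.Str.len cmd)) none
    if !(PySem.Str.startswith rest "{") then false
    else
      let e := PySem.Str.find rest "}"
      if e == -1 then false
      else PySem.Set.contains pvBannedSet (PySem.Str.slice rest (some 1) (some e))

-- ===== PRECONDITION & SPEC =====
def Spec_is_banned_env (line : String) (cmd : String) (out : Bool) : Prop := out = is_banned_env_alt line cmd
instance (line : String) (cmd : String) (out : Bool) : Decidable (Spec_is_banned_env line cmd out) := by unfold Spec_is_banned_env; infer_instance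

-- ===== CLAIM (what is proved, stated in full; the proofs are below) =====
def Claim_equal_is_banned_env : Prop := ∀ (line : String) (cmd : String), Dom_is_banned_env line cmd → Spec_is_banned_env line cmd (is_banned_env line cmd)

-- ===== LEMMAS AND PROOFS =====

theorem pv_single_prefix (c : Char) (l : List Char) : [c] <+: l ↔ l[0]? = some c := by
  cases l with
  | nil => simp
  | cons a t => simp [List.cons_prefix_cons, eq_comm]

theorem pv_find_eq (R : List Char) (i0 : Nat) (h1 : R[i0]? = some '}')
    (h2 : ∀ j < i0, R[j]? ≠ some '}') : PySem.Chars.find R ['}'] = (i0 : Int) := by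
  have hpre : ['}'] <+: R.drop i0 := by
    rw [pv_single_prefix, List.getElem?_drop, Nat.add_zero]; exact h1
  have hinf : ['}'] <:+: R := hpre.isInfix.trans (List.drop_suffix i0 R).isInfix
  have hnn : 0 ≤ PySem.Chars.find R ['}'] := (PySem.Chars.find_nonneg_iff _ _).2 hinf
  obtain ⟨hp, hmin⟩ := PySem.Chars.find_spec hnn
  have hle : (PySem.Chars.find R ['}']).toNat ≤ i0 := by
    by_contra hlt
    exact hmin i0 (by omega) hpre
  have hge : i0 ≤ (PySem.Chars.find R ['}']).toNat := by
    by_contra hlt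
    rw [pv_single_prefix, List.getElem?_drop, Nat.add_zero] at hp
    exact h2 _ (by omega) hp
  omega

theorem pv_forward (k t : List Char) (hk : '}' ∉ k) :
    ('{' :: (k ++ '}' :: t))[0]? = some '{' ∧
    PySem.Chars.find ('{' :: (k ++ '}' :: t)) ['}'] = ((1 + k.length : Nat) : Int) ∧
    PySem.List.slice ('{' :: (k ++ '}' :: t)) (some 1) (some ((1 + k.length : Nat) : Int)) = k := by
  refine ⟨rfl, ?_, ?_⟩
  · apply pv_find_eq
    · rw [Nat.add_comm, List.getElem?_cons_succ, List.getElem?_append_right (le_refl k.length)]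
      simp
    · intro j hj hEq
      match j, hj with
      | 0, _ => simp at hEq
      | (j'+1), hj =>
        have hj' : j' < k.length := by omega
        rw [List.getElem?_cons_succ, List.getElem?_append_left hj',
          List.getElem?_eq_getElem hj'] at hEq
        have hkj : k[j'] = '}' := Option.some.inj hEq
        exact hk (hkj ▸ List.getElem_mem hj')
  · rw [PySem.List.slice_toNat _ (by norm_num) (by positivity), Int.toNat_natCast,
        Int.toNat_one, show 1 + k.length - 1 = k.length from by omega]
    simp

theorem pv_backward (R : List Char) (h0 : R[0]? = some '{')
    (hne : PySem.Chars.find R ['}'] ≠ -1) :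
    ∃ t, R = '{' :: (PySem.List.slice R (some 1) (some (PySem.Chars.find R ['}'])) ++ '}' :: t) := by
  have hnn : 0 ≤ PySem.Chars.find R ['}'] :=
    (PySem.Chars.find_nonneg_iff R ['}']).2 ((PySem.Chars.find_ne_neg_one_iff R ['}']).1 hne)
  obtain ⟨hp, -⟩ := PySem.Chars.find_spec hnn
  rw [pv_single_prefix, List.getElem?_drop, Nat.add_zero] at hp
  have hfn : PySem.Chars.find R ['}'] = ((PySem.Chars.find R ['}']).toNat : Int) :=
    (Int.toNat_of_nonneg hnn).symm
  set n := (PySem.Chars.find R ['}']).toNat with hn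
  have hn1 : 1 ≤ n := by
    rcases Nat.eq_zero_or_pos n with h | h
    · rw [h] at hp
      rw [hp] at h0
      exact absurd (Option.some.inj h0) (by decide)
    · exact h
  obtain ⟨c, R', rfl⟩ : ∃ c R', R = c :: R' := by
    cases R with
    | nil => simp at h0
    | cons c R' => exact ⟨c, R', rfl⟩
  have hc : c = '{' := by simpa using h0
  subst hc
  have hp' : R'[n-1]? = some '}' := by
    have hcast : n = (n-1)+1 := by omega
    rw [hcast, List.getElem?_cons_succ] at hp
    exact hp
  have hlt : n - 1 < R'.length := (List.getElem?_eq_some_iff.1 hp').1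
  have hs : PySem.List.slice ('{'::R') (some 1) (some (PySem.Chars.find ('{'::R') ['}'])) =
      R'.take (n-1) := by
    rw [hfn, PySem.List.slice_toNat _ (by norm_num) (by positivity)]
    simp
  rw [hs]
  refine ⟨R'.drop n, ?_⟩
  have hdrop : '}' :: R'.drop n = R'.drop (n-1) := by
    have h1 : R'[n-1] = '}' := by
      rw [List.getElem?_eq_getElem hlt] at hp'
      exact Option.some.inj hp'
    have h2 : n - 1 + 1 = n := by omega
    have h3 := List.getElem_cons_drop hlt
    rw [h1, h2] at h3
    exact h3
  have : R'.take (n-1) ++ '}' :: R'.drop n = R' := by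
    rw [hdrop, List.take_append_drop]
  rw [this]

theorem pv_loop_iff (line cmd : String) (keys : List String) :
    is_banned_env_loop line cmd keys = true ↔
      ∃ k ∈ keys, PySem.Str.startswith line (cmd ++ "{" ++ k ++ "}") = true := by
  induction keys with
  | nil => simp [is_banned_env_loop]
  | cons a tl ih =>
    simp only [is_banned_env_loop]
    split
    · rename_i h
      exact iff_of_true rfl ⟨a, by simp, h⟩
    · rename_i h
      rw [ih]
      constructor
      · rintro ⟨k, hk, hks⟩
        exact ⟨k, List.mem_cons_of_mem _ hk, hks⟩
      · rintro ⟨k, hk, hks⟩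
        rcases List.mem_cons.1 hk with rfl | hk'
        · exact absurd hks h
        · exact ⟨k, hk', hks⟩

theorem pv_notbrace : ∀ k ∈ pvBanned, '}' ∉ k.toList := by decide

theorem pv_contains_iff (k : String) : PySem.Set.contains pvBannedSet k = true ↔ k ∈ pvBanned := by
  have h : (pvBannedSet : List String) = pvBanned := by decide
  rw [PySem.Set.contains, h]
  simp

theorem pv_main (line cmd : String) : is_banned_env line cmd = is_banned_env_alt line cmd := by
  unfold is_banned_env is_banned_env_alt
  cases hsw : PySem.Str.startswith line cmd with
  | false => simp
  | true =>
    simp only [Bool.not_true, Bool.false_eq_true, if_false]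
    have hpre : cmd.toList <+: line.toList := by
      rw [PySem.Str.startswith_eq] at hsw
      exact (PySem.Chars.startswith_iff _ _).1 hsw
    obtain ⟨u, hu⟩ := hpre
    have hrest : (PySem.Str.slice line (some (PySem.Str.len cmd)) none).toList = u := by
      rw [PySem.Str.toList_slice, PySem.Chars.slice_eq_listSlice]
      have hlen : PySem.Str.len cmd = ((cmd.toList.length : ℕ) : ℤ) := by
        simp [PySem.Str.len]
      rw [hlen, PySem.List.slice_from_natCast, ← hu, List.drop_left]
    rw [Bool.eq_iff_iff, pv_loop_iff]
    constructor
    · rintro ⟨k, hkmem, hkst⟩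
      rw [PySem.Str.startswith_eq] at hkst
      have h1 := (PySem.Chars.startswith_iff _ _).1 hkst
      have h2 : (cmd ++ "{" ++ k ++ "}").toList = cmd.toList ++ ('{' :: (k.toList ++ ['}'])) := by
        simp
      rw [h2, ← hu] at h1
      have hkpre : ('{' :: (k.toList ++ ['}'])) <+: u := (List.prefix_append_right_inj _).1 h1
      obtain ⟨t, ht⟩ := hkpre
      have hut : u = '{' :: (k.toList ++ '}' :: t) := by
        rw [← ht]; simp
      obtain ⟨hf0, hf1, hf2⟩ := pv_forward k.toList t (pv_notbrace k hkmem)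
      have hstart : PySem.Str.startswith (PySem.Str.slice line (some (PySem.Str.len cmd)) none) "{" = true := by
        rw [PySem.Str.startswith_eq]
        apply (PySem.Chars.startswith_iff _ _).2
        rw [show ("{" : String).toList = ['{'] from rfl, pv_single_prefix, hrest, hut]
        exact hf0
      have hfind : PySem.Str.find (PySem.Str.slice line (some (PySem.Str.len cmd)) none) "}" =
          ((1 + k.toList.length : ℕ) : ℤ) := by
        rw [PySem.Str.find_eq, show ("}" : String).toList = ['}'] from rfl, hrest, hut]
        exact hf1
      rw [hstart, hfind]
      simp only [Bool.not_true, Bool.false_eq_true, if_false]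
      have hne : ((((1 + k.toList.length : ℕ) : ℤ)) == (-1 : ℤ)) = false := by
        simp
        omega
      rw [hne]
      simp only [Bool.false_eq_true, if_false]
      have hkeq : PySem.Str.slice (PySem.Str.slice line (some (PySem.Str.len cmd)) none)
          (some 1) (some ((1 + k.toList.length : ℕ) : ℤ)) = k := by
        apply String.toList_inj.1
        rw [PySem.Str.toList_slice, PySem.Chars.slice_eq_listSlice, hrest, hut]
        exact hf2
      rw [hkeq]
      exact (pv_contains_iff k).2 hkmem
    · intro hB
      split_ifs at hB with hc1 hc2
      simp only [Bool.not_eq_true', Bool.not_eq_false] at hc1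
      simp only [beq_iff_eq] at hc2
      have h0 : u[0]? = some '{' := by
        rw [PySem.Str.startswith_eq] at hc1
        have := (PySem.Chars.startswith_iff _ _).1 hc1
        rw [show ("{" : String).toList = ['{'] from rfl, pv_single_prefix, hrest] at this
        exact this
      have hfindeq : PySem.Str.find (PySem.Str.slice line (some (PySem.Str.len cmd)) none) "}" =
          PySem.Chars.find u ['}'] := by
        rw [PySem.Str.find_eq, show ("}" : String).toList = ['}'] from rfl, hrest]
      have hne : PySem.Chars.find u ['}'] ≠ -1 := by
        rw [← hfindeq]; exact hc2
      obtain ⟨t, hut⟩ := pv_backward u h0 hne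
      have hstl : (PySem.Str.slice (PySem.Str.slice line (some (PySem.Str.len cmd)) none)
          (some 1) (some (PySem.Str.find (PySem.Str.slice line (some (PySem.Str.len cmd)) none) "}"))).toList =
          PySem.List.slice u (some 1) (some (PySem.Chars.find u ['}'])) := by
        rw [PySem.Str.toList_slice, PySem.Chars.slice_eq_listSlice, hrest, hfindeq]
      have hsmem : PySem.Str.slice (PySem.Str.slice line (some (PySem.Str.len cmd)) none)
          (some 1) (some (PySem.Str.find (PySem.Str.slice line (some (PySem.Str.len cmd)) none) "}")) ∈ pvBanned :=
        (pv_contains_iff _).1 hB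
      refine ⟨_, hsmem, ?_⟩
      rw [PySem.Str.startswith_eq]
      apply (PySem.Chars.startswith_iff _ _).2
      have h2 : (cmd ++ "{" ++ (PySem.Str.slice (PySem.Str.slice line (some (PySem.Str.len cmd)) none)
          (some 1) (some (PySem.Str.find (PySem.Str.slice line (some (PySem.Str.len cmd)) none) "}"))) ++ "}").toList =
          cmd.toList ++ ('{' :: ((PySem.Str.slice (PySem.Str.slice line (some (PySem.Str.len cmd)) none)
          (some 1) (some (PySem.Str.find (PySem.Str.slice line (some (PySem.Str.len cmd)) none) "}"))).toList ++ ['}'])) := by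
        simp
      rw [h2, ← hu]
      apply (List.prefix_append_right_inj _).2
      refine ⟨t, ?_⟩
      rw [hstl]
      conv_rhs => rw [hut]
      simp

-- ===== VERDICT (by name: the statement is the Claim_ definition above) =====
theorem is_banned_env_spec : Claim_equal_is_banned_env := by
  intro line cmd _
  unfold Spec_is_banned_env
  exact pv_main line cmd
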